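-- pv_equiv track=rewrite | github.com/FrancoRosa/cam_demo | webcam_merge.py | _transform_positions
-- ===== SOURCE A (Python) =====
-- def _transform_positions(positions, mode, webcam_width):
--     transformed = []
--     if mode == 0 or mode == 3:
--         for x, y, cam_id in positions:
--             if cam_id == 0:
--                 transformed.append((x, y))
--             elif cam_id == 1:
--                 transformed.append((x + webcam_width, y))
--     elif mode == 1:
--         for x, y, cam_id in positions:
--             if cam_id == 0:
--                 transformed.append((x, y))
--     elif mode == 2:
--         for x, y, cam_id in positions:
--             if cam_id == 1:
--                 transformed.append((x, y))
--     return transformed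
-- ===== SOURCE B (Python) =====
-- def _transform_positions(positions, mode, webcam_width):
--     if mode not in (0, 1, 2, 3):
--         return []
--     # normalise the mode into three numbers: offset scale and the allowed cam-id range
--     scale = webcam_width if mode in (0, 3) else 0
--     lo = 1 if mode == 2 else 0
--     hi = 0 if mode == 1 else 1
--     kept = [p for p in positions if lo <= p[2] <= hi]
--     return [(x + cam * scale, y) for x, y, cam in kept]
-- ===== Notes on version B (the rewrite author's own statement) =====
-- stated objective: alternative
-- what changed: Replaced A's four mode-specialised branch-chain loops by a one-time numeric normalisation of the mode into (scale, lo, hi), a range test lo<=cam<=hi instead of per-cam branches, an arithmetic offset cam*scale instead of conditional offsets, and two staged passes (filter then map).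
import Mathlib
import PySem

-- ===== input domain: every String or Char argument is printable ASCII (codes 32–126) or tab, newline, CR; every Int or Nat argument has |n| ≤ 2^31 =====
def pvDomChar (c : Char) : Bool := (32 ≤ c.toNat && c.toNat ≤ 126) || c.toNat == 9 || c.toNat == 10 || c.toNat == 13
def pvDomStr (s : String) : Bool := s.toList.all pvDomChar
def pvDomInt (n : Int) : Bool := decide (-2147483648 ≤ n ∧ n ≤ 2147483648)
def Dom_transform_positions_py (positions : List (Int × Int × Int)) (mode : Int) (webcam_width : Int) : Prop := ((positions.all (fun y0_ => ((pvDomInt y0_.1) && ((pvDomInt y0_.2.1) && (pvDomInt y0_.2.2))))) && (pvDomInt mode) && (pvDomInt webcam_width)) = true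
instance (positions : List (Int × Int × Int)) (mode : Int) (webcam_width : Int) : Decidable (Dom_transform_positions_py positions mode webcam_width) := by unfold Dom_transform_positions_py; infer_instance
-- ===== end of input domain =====

-- B normalises the mode once into (scale, lo, hi), keeps cams by a range test and offsets arithmetically (x + cam*scale) in two staged passes (objective: alternative).

-- ===== PORT A =====
def transform_positions_py (positions : List (Int × Int × Int)) (mode : Int) (webcam_width : Int) : List (Int × Int) :=
  let transformed : List (Int × Int) := []
  if mode == 0 || mode == 3 then
    positions.foldl (fun acc p =>
      let (x, y, cam_id) := p
      if cam_id == 0 then acc ++ [(x, y)]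
      else if cam_id == 1 then acc ++ [(x + webcam_width, y)]
      else acc) transformed
  else if mode == 1 then
    positions.foldl (fun acc p =>
      let (x, y, cam_id) := p
      if cam_id == 0 then acc ++ [(x, y)] else acc) transformed
  else if mode == 2 then
    positions.foldl (fun acc p =>
      let (x, y, cam_id) := p
      if cam_id == 1 then acc ++ [(x, y)] else acc) transformed
  else transformed

-- ===== PORT B =====
def transform_positions_py_alt (positions : List (Int × Int × Int)) (mode : Int) (webcam_width : Int) : List (Int × Int) :=
  if !(mode == 0 || mode == 1 || mode == 2 || mode == 3) then []
  else
    let scale : Int := if mode == 0 || mode == 3 then webcam_width else 0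
    let lo : Int := if mode == 2 then 1 else 0
    let hi : Int := if mode == 1 then 0 else 1
    let kept := positions.filter (fun p => decide (lo ≤ p.2.2) && decide (p.2.2 ≤ hi))
    kept.map (fun p => let (x, y, cam) := p; (x + cam * scale, y))

-- ===== PRECONDITION & SPEC =====
def Spec_transform_positions_py (positions : List (Int × Int × Int)) (mode : Int) (webcam_width : Int) (out : List (Int × Int)) : Prop := out = transform_positions_py_alt positions mode webcam_width
instance (positions : List (Int × Int × Int)) (mode : Int) (webcam_width : Int) (out : List (Int × Int)) : Decidable (Spec_transform_positions_py positions mode webcam_width out) := by unfold Spec_transform_positions_py; infer_instance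

-- ===== CLAIM (what is proved, stated in full; the proofs are below) =====
def Claim_equal_transform_positions_py : Prop := ∀ (positions : List (Int × Int × Int)) (mode : Int) (webcam_width : Int), Dom_transform_positions_py positions mode webcam_width → Spec_transform_positions_py positions mode webcam_width (transform_positions_py positions mode webcam_width)

-- ===== LEMMAS AND PROOFS =====

-- A's two-cam append-loop (modes 0/3) equals B's range-filter + arithmetic-offset map
theorem pv_case03 (ps : List (Int × Int × Int)) (w : Int) (acc : List (Int × Int)) :
    ps.foldl (fun acc p =>
      if p.2.2 = 0 then acc ++ [(p.1, p.2.1)]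
      else if p.2.2 = 1 then acc ++ [(p.1 + w, p.2.1)]
      else acc) acc
    = acc ++ (ps.filter (fun p => decide (0 ≤ p.2.2) && decide (p.2.2 ≤ 1))).map
        (fun p => (p.1 + p.2.2 * w, p.2.1)) := by
  induction ps generalizing acc with
  | nil => simp
  | cons h t ih =>
    obtain ⟨x, y, c⟩ := h
    simp only [List.foldl_cons, List.filter_cons]
    by_cases h0 : c = 0
    · subst h0; simp [ih]
    · by_cases h1 : c = 1
      · subst h1; simp [ih, h0]
      · have hcond : (decide ((0:Int) ≤ c) && decide (c ≤ 1)) = false := by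
          simp only [Bool.and_eq_false_iff, decide_eq_false_iff_not]; omega
        simp [ih, h0, h1, hcond]

-- A's single-cam append-loop (modes 1/2, cam k) equals B's degenerate-range filter + identity map
theorem pv_case_one (ps : List (Int × Int × Int)) (k : Int) (acc : List (Int × Int)) :
    ps.foldl (fun acc p => if p.2.2 = k then acc ++ [(p.1, p.2.1)] else acc) acc
    = acc ++ (ps.filter (fun p => decide (k ≤ p.2.2) && decide (p.2.2 ≤ k))).map
        (fun p => (p.1, p.2.1)) := by
  induction ps generalizing acc with
  | nil => simp
  | cons h t ih =>
    obtain ⟨x, y, c⟩ := h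
    simp only [List.foldl_cons, List.filter_cons]
    by_cases hk : c = k
    · subst hk; simp [ih]
    · have hcond : (decide (k ≤ c) && decide (c ≤ k)) = false := by
        simp only [Bool.and_eq_false_iff, decide_eq_false_iff_not]; omega
      simp [ih, hk, hcond]

-- ===== VERDICT (by name: the statement is the Claim_ definition above) =====
theorem transform_positions_py_spec : Claim_equal_transform_positions_py := by
  intro positions mode w _
  unfold Spec_transform_positions_py transform_positions_py transform_positions_py_alt
  by_cases h0 : mode = 0
  · subst h0; norm_num; simpa using pv_case03 positions w []
  by_cases h3 : mode = 3
  · subst h3; norm_num; simpa using pv_case03 positions w []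
  by_cases h1 : mode = 1
  · subst h1; norm_num; simpa using pv_case_one positions 0 []
  by_cases h2 : mode = 2
  · subst h2; norm_num; simpa using pv_case_one positions 1 []
  · simp [h0, h1, h2, h3]
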